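-- pv_equiv track=rewrite | github.com/FerPaye01/Leetcode-Ejercicios | Codeforces/2025/Agosto/2129B-StayMirror.py | resolver_permutacion
-- ===== SOURCE A (Python) =====
-- def resolver_permutacion(p):
--     """
--     Recibe una lista p (permutación) y devuelve el número mínimo de inversiones
--     tras aplicar las decisiones locales de "espejado" cuando reducen el total.
--     La lógica es exactamente la del algoritmo original que compartiste, pero
--     encapsulada para recibir directamente la permutación.
--     """
--     n = len(p)
--
--     # 1) Inversiones base en p (conteo de pares (i<j) con p[i] > p[j])
--     inversiones_base = 0
--     for i in range(n):
--         for j in range(i + 1, n):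
--             if p[i] > p[j]:
--                 inversiones_base += 1
--
--     # 2) Para cada posición i calculamos K_i = (# a la derecha mayores que p[i])
--     #    - (# a la izquierda mayores que p[i]).
--     #    Si K_i < 0, lo aplicamos (reduce el total).
--     delta_inversiones = 0
--     for i in range(n):
--         valor = p[i]
--
--         # contar elementos a la derecha mayores que valor
--         despues_mayor = 0
--         for j in range(i + 1, n):
--             if p[j] > valor:
--                 despues_mayor += 1
--
--         # contar elementos a la izquierda mayores que valor
--         antes_mayor = 0
--         for j in range(i):
--             if p[j] > valor:
--                 antes_mayor += 1
--
--         k_i = despues_mayor - antes_mayor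
--         if k_i < 0:
--             delta_inversiones += k_i
--
--     return inversiones_base + delta_inversiones
-- ===== SOURCE B (Python) =====
-- def resolver_permutacion(p):
--     # One pass: the base inversions plus the beneficial local corrections
--     # collapse to sum over i of min(#greater on the left, #greater on the right).
--     n = len(p)
--     total = 0
--     for i, v in enumerate(p):
--         gl = sum(1 for j in range(i) if p[j] > v)
--         gr = sum(1 for j in range(i + 1, n) if p[j] > v)
--         total += min(gl, gr)
--     return total
-- ===== Notes on version B (the rewrite author's own statement) =====
-- stated objective: simpler
-- what changed: B replaces A's two-phase computation (count all base inversions, then a separate pass applying negative K_i corrections) by the proved identity result = sum over i of min(#greater-to-the-left, #greater-to-the-right), computed in one pass with one per-element formula.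
import Mathlib
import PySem

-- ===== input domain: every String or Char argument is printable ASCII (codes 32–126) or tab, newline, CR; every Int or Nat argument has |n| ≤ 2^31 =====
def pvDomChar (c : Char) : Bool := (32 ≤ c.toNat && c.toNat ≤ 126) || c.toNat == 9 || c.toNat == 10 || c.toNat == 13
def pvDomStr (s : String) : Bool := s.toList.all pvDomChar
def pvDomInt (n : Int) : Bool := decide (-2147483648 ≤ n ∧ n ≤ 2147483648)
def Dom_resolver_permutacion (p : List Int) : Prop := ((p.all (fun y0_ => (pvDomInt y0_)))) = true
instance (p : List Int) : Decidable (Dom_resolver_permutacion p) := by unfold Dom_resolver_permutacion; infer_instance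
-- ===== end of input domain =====

-- B computes the same value by the identity result = Σ_i min(#greater-left, #greater-right):
-- one pass with a per-element formula instead of A's base-inversions count plus correction pass (objective: simpler).

-- ===== PORT A =====
def resolver_permutacion (p : List Int) : Int :=
  let n := p.length
  let inversiones_base :=
    (List.range n).foldl (fun acc i =>
      (List.range' (i+1) (n - (i+1))).foldl
        (fun acc2 j => if p.getD i 0 > p.getD j 0 then acc2 + 1 else acc2) acc) 0
  let delta_inversiones :=
    (List.range n).foldl (fun acc i =>
      let valor := p.getD i 0
      let despues_mayor := (List.range' (i+1) (n - (i+1))).foldl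
        (fun a j => if p.getD j 0 > valor then a + 1 else a) (0 : Int)
      let antes_mayor := (List.range i).foldl
        (fun a j => if p.getD j 0 > valor then a + 1 else a) (0 : Int)
      let k_i := despues_mayor - antes_mayor
      if k_i < 0 then acc + k_i else acc) (0 : Int)
  inversiones_base + delta_inversiones

-- ===== PORT B =====
def resolver_permutacion_alt (p : List Int) : Int :=
  let n := p.length
  (List.range n).foldl (fun total i =>
    let v := p.getD i 0
    let gl := (List.range i).foldl (fun a j => if p.getD j 0 > v then a + 1 else a) (0 : Int)
    let gr := (List.range' (i+1) (n - (i+1))).foldl (fun a j => if p.getD j 0 > v then a + 1 else a) (0 : Int)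
    total + min gl gr) 0

-- ===== PRECONDITION & SPEC =====
def Spec_resolver_permutacion (p : List Int) (out : Int) : Prop := out = resolver_permutacion_alt p
instance (p : List Int) (out : Int) : Decidable (Spec_resolver_permutacion p out) := by unfold Spec_resolver_permutacion; infer_instance

-- ===== CLAIM (what is proved, stated in full; the proofs are below) =====
def Claim_equal_resolver_permutacion : Prop := ∀ (p : List Int), Dom_resolver_permutacion p → Spec_resolver_permutacion p (resolver_permutacion p)

-- ===== LEMMAS AND PROOFS =====

-- count of greater elements strictly left of position i
def pvGl (p : List Int) (i : Nat) : Int :=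
  ((List.range i).countP (fun j => decide (p.getD j 0 > p.getD i 0)) : Int)
-- count of greater elements strictly right of position i (within the first n)
def pvGr (p : List Int) (n i : Nat) : Int :=
  ((List.range' (i+1) (n - (i+1))).countP (fun j => decide (p.getD j 0 > p.getD i 0)) : Int)
-- count of smaller elements strictly right of position i
def pvSr (p : List Int) (n i : Nat) : Int :=
  ((List.range' (i+1) (n - (i+1))).countP (fun j => decide (p.getD i 0 > p.getD j 0)) : Int)

theorem pv_foldl_if {α : Type} (l : List α) (f : α → Prop) [DecidablePred f] (a : Int) :
    l.foldl (fun acc x => if f x then acc + 1 else acc) a = a + (l.countP (fun x => decide (f x)) : Int) := by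
  induction l generalizing a with
  | nil => simp
  | cons x xs ih =>
      simp only [List.foldl_cons, List.countP_cons, ih]
      by_cases h : f x
      · simp only [h, if_pos, decide_true, if_true]
        push_cast
        ring
      · simp [h]

theorem pv_foldl_add {α : Type} (l : List α) (h : α → Int) (a : Int) :
    l.foldl (fun acc x => acc + h x) a = a + (l.map h).sum := by
  induction l generalizing a with
  | nil => simp
  | cons x xs ih => simp [ih]; ring

theorem pv_countP_as_sum (l : List Nat) (f : Nat → Bool) :
    (l.countP f : Int) = (l.map (fun x => if f x then (1 : Int) else 0)).sum := by
  induction l with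
  | nil => simp
  | cons x xs ih =>
      simp only [List.countP_cons, List.map_cons, List.sum_cons, ← ih]
      by_cases h : f x = true
      · simp only [h, if_true]
        push_cast
        ring
      · simp [h]

theorem pv_sum_map_add {α : Type} (l : List α) (f g : α → Int) :
    (l.map (fun x => f x + g x)).sum = (l.map f).sum + (l.map g).sum := by
  induction l with
  | nil => simp
  | cons x xs ih => simp [ih]; ring

-- the double-sum swap: summing smaller-to-the-right equals summing greater-to-the-left
theorem pv_swap (p : List Int) (n : Nat) :
    ((List.range n).map (fun i => pvSr p n i)).sum = ((List.range n).map (fun i => pvGl p i)).sum := by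
  induction n with
  | zero => simp
  | succ n ih =>
      have hsr : ∀ i ∈ List.range n,
          pvSr p (n+1) i = pvSr p n i + (if p.getD i 0 > p.getD n 0 then (1 : Int) else 0) := by
        intro i hi
        have hin : i < n := List.mem_range.mp hi
        have hrange : List.range' (i+1) ((n+1) - (i+1)) =
            List.range' (i+1) (n - (i+1)) ++ [n] := by
          have h1 : (n+1) - (i+1) = (n - (i+1)) + 1 := by omega
          have h2 : (i+1) + (n - (i+1)) = n := by omega
          rw [h1, List.range'_concat]
          simp only [one_mul, h2]
        simp only [pvSr, hrange, List.countP_append, List.countP_cons, List.countP_nil]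
        by_cases h : p.getD i 0 > p.getD n 0
        · simp only [h, decide_true, if_pos, if_true]
          push_cast
          ring
        · simp [h]
      have hsrn : pvSr p (n+1) n = 0 := by simp [pvSr]
      have hgln : pvGl p n =
          ((List.range n).map (fun i => if p.getD i 0 > p.getD n 0 then (1 : Int) else 0)).sum := by
        rw [pvGl, pv_countP_as_sum]
        apply congrArg
        apply List.map_congr_left
        intro i _
        by_cases h : p.getD i 0 > p.getD n 0 <;> simp [h]
      rw [List.range_succ]
      simp only [List.map_append, List.map_cons, List.map_nil, List.sum_append, List.sum_cons,
        List.sum_nil, hsrn]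
      rw [List.map_congr_left hsr, pv_sum_map_add, ih, hgln]
      ring

-- A's value as a sum over indices
theorem pv_A_sum (p : List Int) :
    resolver_permutacion p =
      ((List.range p.length).map (fun i => pvSr p p.length i)).sum +
      ((List.range p.length).map (fun i =>
        if pvGr p p.length i - pvGl p i < 0 then pvGr p p.length i - pvGl p i else 0)).sum := by
  unfold resolver_permutacion
  simp only []
  congr 1
  · -- base loop
    have hstep : (fun (acc : Int) (i : Nat) =>
        (List.range' (i+1) (p.length - (i+1))).foldl
          (fun acc2 j => if p.getD i 0 > p.getD j 0 then acc2 + 1 else acc2) acc)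
        = (fun acc i => acc + pvSr p p.length i) := by
      funext acc i
      rw [pv_foldl_if]
      rfl
    rw [hstep, pv_foldl_add, zero_add]
  · -- delta loop
    have hstep : (fun (acc : Int) (i : Nat) =>
        let valor := p.getD i 0
        let despues_mayor := (List.range' (i+1) (p.length - (i+1))).foldl
          (fun a j => if p.getD j 0 > valor then a + 1 else a) (0 : Int)
        let antes_mayor := (List.range i).foldl
          (fun a j => if p.getD j 0 > valor then a + 1 else a) (0 : Int)
        let k_i := despues_mayor - antes_mayor
        if k_i < 0 then acc + k_i else acc)
        = (fun acc i => acc +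
            (if pvGr p p.length i - pvGl p i < 0 then pvGr p p.length i - pvGl p i else 0)) := by
      funext acc i
      simp only [pv_foldl_if, pvGr, pvGl, zero_add]
      split_ifs with h <;> ring
    rw [hstep, pv_foldl_add, zero_add]

-- B's value as a sum over indices
theorem pv_B_sum (p : List Int) :
    resolver_permutacion_alt p =
      ((List.range p.length).map (fun i => min (pvGl p i) (pvGr p p.length i))).sum := by
  unfold resolver_permutacion_alt
  simp only []
  have hstep : (fun (total : Int) (i : Nat) =>
      let v := p.getD i 0
      let gl := (List.range i).foldl (fun a j => if p.getD j 0 > v then a + 1 else a) (0 : Int)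
      let gr := (List.range' (i+1) (p.length - (i+1))).foldl
        (fun a j => if p.getD j 0 > v then a + 1 else a) (0 : Int)
      total + min gl gr)
      = (fun total i => total + min (pvGl p i) (pvGr p p.length i)) := by
    funext total i
    simp [pv_foldl_if, pvGl, pvGr]
  rw [hstep, pv_foldl_add, zero_add]

theorem pv_min_eq (gl gr : Int) :
    gl + (if gr - gl < 0 then gr - gl else 0) = min gl gr := by
  rcases le_total gl gr with h | h <;> simp [min_def, h] <;> omega

-- ===== VERDICT (by name: the statement is the Claim_ definition above) =====
theorem resolver_permutacion_spec : Claim_equal_resolver_permutacion := by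
  intro p _
  unfold Spec_resolver_permutacion
  rw [pv_A_sum, pv_B_sum, pv_swap, ← pv_sum_map_add]
  apply congrArg
  apply List.map_congr_left
  intro i _
  exact pv_min_eq _ _
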